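-- pv_equiv track=rewrite | github.com/anaticulae/utilo | utila/group.py | groupby_none
-- ===== SOURCE A (Python) =====
-- def groupby_none(items) -> list:
--     """\
--     >>> groupby_none([0, 1, 2, None, 1, None, 3, 4, 5, None])
--     [(0, 1, 2), (1,), (3, 4, 5)]
--     """
--     result = []
--     collected = []
--     for item in items:
--         if item is not None:
--             collected.append(item)
--         else:
--             if collected:
--                 result.append(collected)
--                 collected = []
--     if collected:
--         result.append(collected)
--     result = [tuple(item) for item in result]
--     return result
-- ===== SOURCE B (Python) =====
-- def groupby_none(items) -> list:
--     """Run-scanning re-implementation: find each maximal run of non-None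
--     items with two indices and slice it out, instead of A's
--     accumulator-and-flush loop."""
--     result = []
--     i = 0
--     n = len(items)
--     while i < n:
--         if items[i] is None:
--             i += 1
--         else:
--             j = i
--             while j < n and items[j] is not None:
--                 j += 1
--             result.append(tuple(items[i:j]))
--             i = j
--     return result
-- ===== Notes on version B (the rewrite author's own statement) =====
-- stated objective: alternative
-- what changed: B replaces A's accumulator-and-flush loop with a run-scanning pass: two indices locate each maximal run of non-None items, which is sliced out as a tuple directly.
import Mathlib
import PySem

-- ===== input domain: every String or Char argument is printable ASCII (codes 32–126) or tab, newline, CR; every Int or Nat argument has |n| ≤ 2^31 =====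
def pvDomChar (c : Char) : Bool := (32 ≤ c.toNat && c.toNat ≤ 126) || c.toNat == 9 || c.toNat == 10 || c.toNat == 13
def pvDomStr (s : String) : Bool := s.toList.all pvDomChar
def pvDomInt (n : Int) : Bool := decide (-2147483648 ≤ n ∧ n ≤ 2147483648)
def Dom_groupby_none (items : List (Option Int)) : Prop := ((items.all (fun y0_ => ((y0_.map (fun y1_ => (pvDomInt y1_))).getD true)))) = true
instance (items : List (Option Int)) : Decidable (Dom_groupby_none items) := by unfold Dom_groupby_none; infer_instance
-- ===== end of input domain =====

-- ===== PORT A =====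
-- A's loop body: append to collected, or flush collected into result on None
def stepA (rc : List (List Int) × List Int) (item : Option Int) : List (List Int) × List Int :=
  match item with
  | some x => (rc.1, rc.2 ++ [x])
  | none => if rc.2 ≠ [] then (rc.1 ++ [rc.2], []) else (rc.1, rc.2)

-- A: fold carrying (result, collected); final flush, then the identity
-- comprehension "[tuple(item) for item in result]" (tuple = the group itself here).
def groupby_none (items : List (Option Int)) : List (List Int) :=
  let st := items.foldl stepA ([], [])
  let result := if st.2 ≠ [] then st.1 ++ [st.2] else st.1
  result.map (fun g => g)

-- ===== PORT B =====
-- B: run-scanning. The inner while loop that advances j over the non-None run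
-- is transcribed as takeWhile (the slice items[i:j]) and dropWhile (i = j).
def groupby_none_alt (items : List (Option Int)) : List (List Int) :=
  match items with
  | [] => []
  | none :: rest => groupby_none_alt rest
  | some x :: rest =>
      (x :: (rest.takeWhile Option.isSome).filterMap id) ::
        groupby_none_alt (rest.dropWhile Option.isSome)
  termination_by items.length
  decreasing_by
    · simp
    · simp; exact List.length_dropWhile_le _ _

-- ===== PRECONDITION & SPEC =====
def Spec_groupby_none (items : List (Option Int)) (out : List (List Int)) : Prop := out = groupby_none_alt items
instance (items : List (Option Int)) (out : List (List Int)) : Decidable (Spec_groupby_none items out) := by unfold Spec_groupby_none; infer_instance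

-- ===== CLAIM (what is proved, stated in full; the proofs are below) =====
def Claim_equal_groupby_none : Prop := ∀ (items : List (Option Int)), Dom_groupby_none items → Spec_groupby_none items (groupby_none items)

-- ===== LEMMAS AND PROOFS =====

-- proof-side model of A's loop: the groups of `items` with `c` still pending
def gAux (c : List Int) (items : List (Option Int)) : List (List Int) :=
  match items with
  | [] => if c = [] then [] else [c]
  | none :: t => (if c = [] then [] else [c]) ++ gAux [] t
  | some x :: t => gAux (c ++ [x]) t

theorem gAux_eq_alt (items : List (Option Int)) : ∀ (c : List Int),
    gAux c items = if c = [] then groupby_none_alt items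
      else (c ++ (items.takeWhile Option.isSome).filterMap id) ::
        groupby_none_alt (items.dropWhile Option.isSome) := by
  induction items with
  | nil =>
      intro c
      by_cases h : c = [] <;> simp [gAux, groupby_none_alt, h]
  | cons hd t ih =>
      intro c
      match hd with
      | none =>
          by_cases h : c = [] <;>
            simp [gAux, groupby_none_alt, h, ih [], List.takeWhile, List.dropWhile,
              Option.isSome]
      | some x =>
          have hx : (c ++ [x]) ≠ [] := by simp
          rw [show gAux c (some x :: t) = gAux (c ++ [x]) t from rfl, ih (c ++ [x])]
          by_cases h : c = [] <;>
            simp [groupby_none_alt, h, hx, List.takeWhile, List.dropWhile, Option.isSome]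

theorem foldl_eq_gAux (items : List (Option Int)) : ∀ (r : List (List Int)) (c : List Int),
    (let st := items.foldl stepA (r, c)
      if st.2 ≠ [] then st.1 ++ [st.2] else st.1) = r ++ gAux c items := by
  induction items with
  | nil =>
      intro r c
      by_cases h : c = [] <;> simp [gAux, h]
  | cons hd t ih =>
      intro r c
      match hd with
      | some x => simpa [gAux, List.foldl, stepA] using ih r (c ++ [x])
      | none =>
          by_cases h : c = [] <;>
            simp [gAux, List.foldl, stepA, h, ih]

-- ===== VERDICT (by name: the statement is the Claim_ definition above) =====
theorem groupby_none_spec : Claim_equal_groupby_none := by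
  intro items _
  unfold Spec_groupby_none groupby_none
  have h := foldl_eq_gAux items [] []
  simp only [List.nil_append] at h
  simpa [h] using (gAux_eq_alt items []).trans (by simp)
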